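-- pv_equiv track=rewrite | github.com/dsmith167/Lupus | project_functions.py | d_combine
-- ===== SOURCE A (Python) =====
-- def rl(x):
--     return range(len(x))
--
-- def d_combine(d1,d2):
--     #combine dictionaries
--     #priority to d1 if there are duplicate keys
--     key1=list(d1.keys()); key2=list(d2.keys())
--     setk=sorted(list(set(key1+key2)))
--     dfin={}
--     for i in rl(setk):
--         item=setk[i]
--         if item in key2: dfin[item]=d2[item]
--         if item in key1: dfin[item]=d1[item]
--     return dfin
-- ===== SOURCE B (Python) =====
-- def d_combine(d1, d2):
--     # sort each dict's items by key, then two-pointer merge; d1 wins on equal keys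
--     a = sorted(d1.items(), key=lambda p: p[0])
--     b = sorted(d2.items(), key=lambda p: p[0])
--     out = {}
--     i = j = 0
--     while i < len(a) and j < len(b):
--         if a[i][0] < b[j][0]:
--             k, v = a[i]; i += 1
--         elif b[j][0] < a[i][0]:
--             k, v = b[j]; j += 1
--         else:
--             k, v = a[i]; i += 1; j += 1
--         out[k] = v
--     while i < len(a):
--         out[a[i][0]] = a[i][1]; i += 1
--     while j < len(b):
--         out[b[j][0]] = b[j][1]; j += 1
--     return out
-- ===== Notes on version B (the rewrite author's own statement) =====
-- stated objective: faster
-- what changed: Replaces A's union-of-keys pass with per-key 'item in key1/key2' list scans by a classic two-pointer merge: sort each dict's item list by key once, then merge the two sorted runs in one linear pass with d1 taking the pair on equal keys, so no membership test over a key list ever runs.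
import Mathlib
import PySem

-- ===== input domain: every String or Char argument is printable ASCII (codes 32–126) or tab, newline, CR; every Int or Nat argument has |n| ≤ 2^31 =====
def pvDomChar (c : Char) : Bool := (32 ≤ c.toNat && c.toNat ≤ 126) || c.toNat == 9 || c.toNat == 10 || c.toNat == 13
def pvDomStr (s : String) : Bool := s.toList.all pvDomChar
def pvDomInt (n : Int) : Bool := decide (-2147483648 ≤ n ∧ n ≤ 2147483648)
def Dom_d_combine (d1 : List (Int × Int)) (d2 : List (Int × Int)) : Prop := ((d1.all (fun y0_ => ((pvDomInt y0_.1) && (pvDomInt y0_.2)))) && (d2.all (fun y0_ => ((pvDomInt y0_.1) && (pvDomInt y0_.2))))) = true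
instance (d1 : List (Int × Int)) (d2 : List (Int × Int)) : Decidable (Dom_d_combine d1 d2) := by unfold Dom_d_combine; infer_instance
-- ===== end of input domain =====

-- B sorts each dict's item list by key once and merges the two sorted runs with a two-pointer
-- pass (d1's pair wins on equal keys), instead of A's scan over the sorted key union with
-- per-key list-membership tests.

-- ===== PORT A =====
def d_combine (d1 : List (Int × Int)) (d2 : List (Int × Int)) : List (Int × Int) :=
  let key1 := (PySem.Dict.mk d1).keys
  let key2 := (PySem.Dict.mk d2).keys
  let setk := PySem.List.sorted (PySem.Set.ofList (key1 ++ key2)) (fun x => x) false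
  let dfin := setk.foldl (fun dfin item =>
    let dfin := if key2.contains item then dfin.insert item (((PySem.Dict.mk d2).get? item).getD 0) else dfin
    if key1.contains item then dfin.insert item (((PySem.Dict.mk d1).get? item).getD 0) else dfin)
    PySem.Dict.empty
  dfin.items

-- ===== PORT B =====
-- the two-pointer while loops of Source B, as structural recursion on the two remaining suffixes;
-- the two trailing drain loops are the base cases
def pvMergeB : List (Int × Int) → List (Int × Int) → PySem.Dict Int Int → PySem.Dict Int Int
  | [], ys, out => ys.foldl (fun o p => o.insert p.1 p.2) out
  | p :: xs, [], out => (p :: xs).foldl (fun o p => o.insert p.1 p.2) out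
  | p :: xs, q :: ys, out =>
    if p.1 < q.1 then pvMergeB xs (q :: ys) (out.insert p.1 p.2)
    else if q.1 < p.1 then pvMergeB (p :: xs) ys (out.insert q.1 q.2)
    else pvMergeB xs ys (out.insert p.1 p.2)
termination_by xs ys _ => xs.length + ys.length
decreasing_by all_goals (simp; try omega)

def d_combine_alt (d1 : List (Int × Int)) (d2 : List (Int × Int)) : List (Int × Int) :=
  let a := PySem.List.sorted (PySem.Dict.mk d1).items (fun p => p.1) false
  let b := PySem.List.sorted (PySem.Dict.mk d2).items (fun p => p.1) false
  (pvMergeB a b PySem.Dict.empty).items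

-- ===== PRECONDITION & SPEC =====
-- Pre_ restricts to assoc lists with duplicate-free keys: every Python dict is represented by such a list, so no actual Python input is excluded.
def Pre_d_combine (d1 : List (Int × Int)) (d2 : List (Int × Int)) : Prop :=
  (d1.map Prod.fst).Nodup ∧ (d2.map Prod.fst).Nodup
instance (d1 : List (Int × Int)) (d2 : List (Int × Int)) : Decidable (Pre_d_combine d1 d2) := by unfold Pre_d_combine; infer_instance
def pvWitness_d_combine : (List (Int × Int)) × (List (Int × Int)) := ([(3, 1), (1, 2)], [(1, 7), (5, 9)])
def Spec_d_combine (d1 : List (Int × Int)) (d2 : List (Int × Int)) (out : List (Int × Int)) : Prop := out = d_combine_alt d1 d2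
instance (d1 : List (Int × Int)) (d2 : List (Int × Int)) (out : List (Int × Int)) : Decidable (Spec_d_combine d1 d2 out) := by unfold Spec_d_combine; infer_instance

-- ===== CLAIM (what is proved, stated in full; the proofs are below) =====
def Claim_equal_d_combine : Prop := ∀ (d1 : List (Int × Int)) (d2 : List (Int × Int)), Dom_d_combine d1 d2 → Pre_d_combine d1 d2 → Spec_d_combine d1 d2 (d_combine d1 d2)

-- ===== LEMMAS AND PROOFS =====

-- the merged PAIR LIST produced by Source B's two-pointer pass (proof-side abstraction of pvMergeB)
def pvM : List (Int × Int) → List (Int × Int) → List (Int × Int)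
  | [], ys => ys
  | p :: xs, [] => p :: xs
  | p :: xs, q :: ys =>
    if p.1 < q.1 then p :: pvM xs (q :: ys)
    else if q.1 < p.1 then q :: pvM (p :: xs) ys
    else p :: pvM xs ys
termination_by xs ys => xs.length + ys.length
decreasing_by all_goals (simp; try omega)

theorem pvMergeB_eq_foldl (xs ys : List (Int × Int)) (out : PySem.Dict Int Int) :
    pvMergeB xs ys out = (pvM xs ys).foldl (fun o p => o.insert p.1 p.2) out := by
  fun_induction pvM xs ys generalizing out with
  | case1 ys => simp [pvMergeB]
  | case2 p xs => simp [pvMergeB]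
  | case3 p xs q ys h ih => simp [pvMergeB, h, ih]
  | case4 p xs q ys h h' ih => simp [pvMergeB, h, h', ih]
  | case5 p xs q ys h h' ih => simp [pvMergeB, h, h', ih]

theorem pvM_mem (xs ys : List (Int × Int)) (r : Int × Int) (h : r ∈ pvM xs ys) :
    r ∈ xs ∨ r ∈ ys := by
  fun_induction pvM xs ys with
  | case1 ys => exact Or.inr h
  | case2 p xs => exact Or.inl h
  | case3 p xs q ys hlt ih =>
    rcases List.mem_cons.mp h with h1 | h1
    · exact Or.inl (by simp [h1])
    · rcases ih h1 with h2 | h2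
      · exact Or.inl (List.mem_cons_of_mem _ h2)
      · exact Or.inr h2
  | case4 p xs q ys hlt hgt ih =>
    rcases List.mem_cons.mp h with h1 | h1
    · exact Or.inr (by simp [h1])
    · rcases ih h1 with h2 | h2
      · exact Or.inl h2
      · exact Or.inr (List.mem_cons_of_mem _ h2)
  | case5 p xs q ys hlt hgt ih =>
    rcases List.mem_cons.mp h with h1 | h1
    · exact Or.inl (by simp [h1])
    · rcases ih h1 with h2 | h2
      · exact Or.inl (List.mem_cons_of_mem _ h2)
      · exact Or.inr (List.mem_cons_of_mem _ h2)

theorem pvM_mem_key (xs ys : List (Int × Int)) (k : Int) :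
    k ∈ (pvM xs ys).map Prod.fst ↔ k ∈ xs.map Prod.fst ∨ k ∈ ys.map Prod.fst := by
  fun_induction pvM xs ys with
  | case1 ys => simp
  | case2 p xs => simp
  | case3 p xs q ys hlt ih => simp only [List.map_cons, List.mem_cons, ih]; tauto
  | case4 p xs q ys hlt hgt ih => simp only [List.map_cons, List.mem_cons, ih]; tauto
  | case5 p xs q ys hlt hgt ih =>
    have : q.1 = p.1 := by omega
    simp only [List.map_cons, List.mem_cons, ih, this]; tauto

theorem pvM_pairwise (xs ys : List (Int × Int))
    (hx : xs.Pairwise (fun a b => a.1 < b.1)) (hy : ys.Pairwise (fun a b => a.1 < b.1)) :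
    (pvM xs ys).Pairwise (fun a b => a.1 < b.1) := by
  fun_induction pvM xs ys with
  | case1 ys => exact hy
  | case2 p xs => exact hx
  | case3 p xs q ys hlt ih =>
    rw [List.pairwise_cons] at hx
    refine List.pairwise_cons.mpr ⟨?_, ih hx.2 hy⟩
    intro r hr
    rcases pvM_mem _ _ _ hr with h | h
    · exact hx.1 r h
    · rcases List.mem_cons.mp h with h1 | h1
      · simp [h1]; omega
      · rw [List.pairwise_cons] at hy
        have := hy.1 r h1; omega
  | case4 p xs q ys hlt hgt ih =>
    rw [List.pairwise_cons] at hy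
    refine List.pairwise_cons.mpr ⟨?_, ih hx hy.2⟩
    intro r hr
    rcases pvM_mem _ _ _ hr with h | h
    · rcases List.mem_cons.mp h with h1 | h1
      · simp [h1]; omega
      · rw [List.pairwise_cons] at hx
        have := hx.1 r h1; omega
    · exact hy.1 r h
  | case5 p xs q ys hlt hgt ih =>
    rw [List.pairwise_cons] at hx
    rw [List.pairwise_cons] at hy
    refine List.pairwise_cons.mpr ⟨?_, ih hx.2 hy.2⟩
    intro r hr
    rcases pvM_mem _ _ _ hr with h | h
    · exact hx.1 r h
    · have := hy.1 r h; omega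

-- which side each merged pair comes from: from xs, or from ys with a key absent from xs
theorem pvM_priority (xs ys : List (Int × Int))
    (hx : xs.Pairwise (fun a b => a.1 < b.1)) (hy : ys.Pairwise (fun a b => a.1 < b.1)) :
    ∀ r ∈ pvM xs ys, r ∈ xs ∨ (r ∈ ys ∧ r.1 ∉ xs.map Prod.fst) := by
  fun_induction pvM xs ys with
  | case1 ys => intro r hr; exact Or.inr ⟨hr, by simp⟩
  | case2 p xs => intro r hr; exact Or.inl hr
  | case3 p xs q ys hlt ih =>
    rw [List.pairwise_cons] at hx
    intro r hr
    rcases List.mem_cons.mp hr with h1 | h1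
    · exact Or.inl (by simp [h1])
    · rcases ih hx.2 hy r h1 with h2 | h2
      · exact Or.inl (List.mem_cons_of_mem _ h2)
      · refine Or.inr ⟨h2.1, ?_⟩
        simp only [List.map_cons, List.mem_cons]
        push Not
        refine ⟨?_, h2.2⟩
        rcases List.mem_cons.mp h2.1 with h3 | h3
        · rw [h3]; omega
        · rw [List.pairwise_cons] at hy
          have := hy.1 r h3; omega
  | case4 p xs q ys hlt hgt ih =>
    rw [List.pairwise_cons] at hy
    intro r hr
    rcases List.mem_cons.mp hr with h1 | h1
    · refine Or.inr ⟨by simp [h1], ?_⟩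
      subst h1
      intro hmem
      rcases List.mem_map.mp hmem with ⟨s, hs, hks⟩
      rcases List.mem_cons.mp hs with h3 | h3
      · rw [← hks, h3] at hgt; omega
      · rw [List.pairwise_cons] at hx
        have := hx.1 s h3; omega
    · rcases ih hx hy.2 r h1 with h2 | h2
      · exact Or.inl h2
      · exact Or.inr ⟨List.mem_cons_of_mem _ h2.1, h2.2⟩
  | case5 p xs q ys hlt hgt ih =>
    rw [List.pairwise_cons] at hx
    rw [List.pairwise_cons] at hy
    intro r hr
    rcases List.mem_cons.mp hr with h1 | h1
    · exact Or.inl (by simp [h1])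
    · rcases ih hx.2 hy.2 r h1 with h2 | h2
      · exact Or.inl (List.mem_cons_of_mem _ h2)
      · refine Or.inr ⟨List.mem_cons_of_mem _ h2.1, ?_⟩
        simp only [List.map_cons, List.mem_cons]
        push Not
        refine ⟨?_, h2.2⟩
        have := hy.1 r h2.1; omega

-- Pairwise ≤ on keys plus distinct keys gives Pairwise < on keys
theorem pvPairwiseStrengthen (l : List (Int × Int))
    (hle : l.Pairwise (fun a b => a.1 ≤ b.1)) (hnd : (l.map Prod.fst).Nodup) :
    l.Pairwise (fun a b => a.1 < b.1) := by
  rw [List.nodup_iff_pairwise_ne, List.pairwise_map] at hnd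
  exact (hle.and hnd).imp (fun h => lt_of_le_of_ne h.1 h.2)

theorem pvMain (d1 d2 : List (Int × Int))
    (h1 : (d1.map Prod.fst).Nodup) (h2 : (d2.map Prod.fst).Nodup) :
    d_combine d1 d2 = d_combine_alt d1 d2 := by
  unfold d_combine d_combine_alt
  simp only []
  set key1 := d1.map Prod.fst with hk1
  set key2 := d2.map Prod.fst with hk2
  have hkeys1 : (PySem.Dict.mk d1).keys = key1 := rfl
  have hkeys2 : (PySem.Dict.mk d2).keys = key2 := rfl
  have hitems1 : (PySem.Dict.mk d1).items = d1 := rfl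
  have hitems2 : (PySem.Dict.mk d2).items = d2 := rfl
  set f : Int → Int := fun k =>
    if key1.contains k then ((PySem.Dict.mk d1).get? k).getD 0
    else ((PySem.Dict.mk d2).get? k).getD 0 with hf
  set U := PySem.Set.ofList (key1 ++ key2) with hU
  set setk := PySem.List.sorted U (fun x => x) false with hsetk
  have hUnodup : U.Nodup := PySem.Set.nodup_ofList _
  have hsetknd : setk.Nodup :=
    (PySem.List.sorted_perm U (fun x => x) false).symm.nodup hUnodup
  -- ===== A's side: the loop collapses to one insert of the priority value per key =====
  have hA : setk.foldl (fun dfin item =>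
      if key1.contains item then
        (if key2.contains item then dfin.insert item (((PySem.Dict.mk d2).get? item).getD 0) else dfin).insert
          item (((PySem.Dict.mk d1).get? item).getD 0)
      else
        if key2.contains item then dfin.insert item (((PySem.Dict.mk d2).get? item).getD 0) else dfin)
      PySem.Dict.empty
      = setk.foldl (fun dfin item => dfin.insert item (f item)) PySem.Dict.empty := by
    apply PySem.List.foldl_congr_mem'
    intro x hx acc
    have hxU : x ∈ key1 ++ key2 := by
      exact (PySem.Set.mem_ofList _ _).mp ((PySem.List.mem_sorted U (fun x => x) false x).mp hx)
    have hor : x ∈ key1 ∨ x ∈ key2 := List.mem_append.mp hxU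
    by_cases hm1 : x ∈ key1 <;> by_cases hm2 : x ∈ key2 <;>
      simp [hf, List.contains_eq_mem, hm1, hm2, PySem.Dict.insert_insert_self] <;> tauto
  -- ===== B's side: the merged pair list =====
  set a := PySem.List.sorted d1 (fun p => p.1) false with ha
  set b := PySem.List.sorted d2 (fun p => p.1) false with hb
  have hap : a.Perm d1 := PySem.List.sorted_perm d1 (fun p => p.1) false
  have hbp : b.Perm d2 := PySem.List.sorted_perm d2 (fun p => p.1) false
  have haknd : (a.map Prod.fst).Nodup := ((hap.map Prod.fst).nodup_iff).mpr h1
  have hbknd : (b.map Prod.fst).Nodup := ((hbp.map Prod.fst).nodup_iff).mpr h2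
  have hapw : a.Pairwise (fun p q => p.1 < q.1) :=
    pvPairwiseStrengthen a (PySem.List.sorted_pairwise d1 (fun p => p.1)) haknd
  have hbpw : b.Pairwise (fun p q => p.1 < q.1) :=
    pvPairwiseStrengthen b (PySem.List.sorted_pairwise d2 (fun p => p.1)) hbknd
  set m := pvM a b with hm
  have hmpw : m.Pairwise (fun p q => p.1 < q.1) := pvM_pairwise a b hapw hbpw
  have hmknd : (m.map Prod.fst).Nodup := by
    rw [List.nodup_iff_pairwise_ne, List.pairwise_map]
    exact hmpw.imp (fun h => by omega)
  have hmkpw : (m.map Prod.fst).Pairwise (· < ·) := List.pairwise_map.mpr hmpw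
  -- keys of the merge are exactly the key union, so sorted they are setk
  have hsetk_eq : setk = m.map Prod.fst := by
    rw [hsetk]
    apply PySem.List.sorted_eq_of_perm_of_pairwise_lt
    · apply (List.perm_ext_iff_of_nodup hmknd hUnodup).mpr
      intro k
      rw [PySem.Set.mem_ofList, pvM_mem_key, List.mem_append]
      rw [← hap.map Prod.fst |>.mem_iff, ← hbp.map Prod.fst |>.mem_iff]
    · exact hmkpw
  -- every merged pair carries the priority value of its key
  have hmval : ∀ r ∈ m, r = (r.1, f r.1) := by
    intro r hr
    rcases pvM_priority a b hapw hbpw r hr with hA1 | hB1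
    · have hmem : r ∈ d1 := hap.subset hA1
      have hget : (PySem.Dict.mk d1).get? r.1 = some r.2 :=
        PySem.Dict.get?_of_mem_items (d := PySem.Dict.mk d1) (by rw [hitems1]; exact hmem) h1
      have hkin : r.1 ∈ key1 := List.mem_map.mpr ⟨r, hmem, rfl⟩
      have hfv : f r.1 = r.2 := by
        simp [hf, hkin, hget]
      simp [hfv]
    · have hmem : r ∈ d2 := hbp.subset hB1.1
      have hget : (PySem.Dict.mk d2).get? r.1 = some r.2 :=
        PySem.Dict.get?_of_mem_items (d := PySem.Dict.mk d2) (by rw [hitems2]; exact hmem) h2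
      have hknotin : r.1 ∉ key1 := fun hmem1 =>
        hB1.2 ((hap.map Prod.fst).mem_iff.mpr hmem1)
      have hfv : f r.1 = r.2 := by
        simp [hf, hknotin, hget]
      simp [hfv]
  have hm_as_map : m = setk.map (fun k => (k, f k)) := by
    rw [hsetk_eq, List.map_map]
    conv_lhs => rw [← List.map_id m]
    apply List.map_congr_left
    intro r hr
    simpa using hmval r hr
  -- ===== assemble =====
  rw [hkeys1, hkeys2, ← hU, ← hsetk, hA, pvMergeB_eq_foldl, ← hm]
  rw [PySem.Dict.items_foldl_insert_fresh setk (fun k => k) f PySem.Dict.empty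
        (fun x _ => PySem.Dict.contains_empty (ν := Int) x) (by simpa using hsetknd),
      PySem.Dict.items_foldl_insert_fresh m Prod.fst Prod.snd PySem.Dict.empty
        (fun x _ => PySem.Dict.contains_empty (ν := Int) x) hmknd]
  rw [hm_as_map]
  simp [PySem.Dict.empty]

-- ===== VERDICT (by name: the statement is the Claim_ definition above) =====
theorem d_combine_spec : Claim_equal_d_combine := by
  intro d1 d2 _ hpre
  exact pvMain d1 d2 hpre.1 hpre.2
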